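-- pv_equiv track=rewrite | github.com/caigee-cmd/wechat-insight | scripts/analyze/mbti.py | count_keyword_hits
-- ===== SOURCE A (Python) =====
-- def count_keyword_hits(content, keywords):
--     lowered = content.lower()
--     hits = []
--     score = 0
--     for keyword, weight in keywords.items():
--         if keyword.lower() in lowered:
--             hits.append(keyword)
--             score += weight
--     return hits, score
-- ===== SOURCE B (Python) =====
-- def count_keyword_hits(content, keywords):
--     # Single left-to-right scan: at each position test the keywords still pending,
--     # moving matches into `found`; the scan stops as soon as every keyword is found.
--     lowered = content.lower()
--     pending = list(dict.fromkeys(k.lower() for k in keywords))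
--     found = set()
--     for i in range(len(lowered) + 1):
--         if not pending:
--             break
--         found.update(kw for kw in pending if lowered.startswith(kw, i))
--         pending = [kw for kw in pending if kw not in found]
--     hits = [k for k in keywords if k.lower() in found]
--     score = sum(w for k, w in keywords.items() if k.lower() in found)
--     return hits, score
-- ===== Notes on version B (the rewrite author's own statement) =====
-- stated objective: alternative
-- what changed: Instead of running a separate full substring search over the content for every keyword, B makes one left-to-right scan over the lowered content, testing at each position only the keywords still pending (startswith), moving matches into a found-set and stopping early once every keyword is found; hits and score are then read off the dict in order.
import Mathlib
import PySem

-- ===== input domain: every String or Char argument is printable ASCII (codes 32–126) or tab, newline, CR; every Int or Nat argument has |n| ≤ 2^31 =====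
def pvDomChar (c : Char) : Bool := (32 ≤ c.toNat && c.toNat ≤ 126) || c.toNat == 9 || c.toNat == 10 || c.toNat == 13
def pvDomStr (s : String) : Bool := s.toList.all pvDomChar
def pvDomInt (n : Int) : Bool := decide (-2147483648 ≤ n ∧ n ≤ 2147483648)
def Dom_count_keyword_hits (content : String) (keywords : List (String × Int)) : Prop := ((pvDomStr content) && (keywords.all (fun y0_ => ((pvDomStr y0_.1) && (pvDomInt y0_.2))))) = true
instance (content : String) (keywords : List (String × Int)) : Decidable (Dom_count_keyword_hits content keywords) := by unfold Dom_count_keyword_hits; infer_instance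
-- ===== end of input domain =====

-- B replaces the per-keyword substring search with one left-to-right scan of the
-- lowered content that tests the still-pending keywords at each position and stops
-- once all are found (alternative algorithm; same results proved).


-- ===== PORT A =====
def count_keyword_hits (content : String) (keywords : List (String × Int)) : List String × Int :=
  let lowered := PySem.Str.lower content
  keywords.foldl
    (fun acc p =>
      if PySem.Str.isIn (PySem.Str.lower p.1) lowered
      then (acc.1 ++ [p.1], acc.2 + p.2)
      else acc)
    ([], 0)

-- ===== PORT B =====
-- one scan step of B's loop body (break ported as "state unchanged once pending is empty");
-- lowered.startswith(kw, i) with 0 ≤ i is exactly startswith on (lowered.drop i.toNat)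
def pvScanStep (lowered : List Char)
    (st : List (List Char) × PySem.Set (List Char)) (i : Int) :
    List (List Char) × PySem.Set (List Char) :=
  if st.1.isEmpty then st
  else
    let found := PySem.Set.update st.2
      (st.1.filter (fun kw => PySem.Chars.startswith (lowered.drop i.toNat) kw))
    (st.1.filter (fun kw => !PySem.Set.contains found kw), found)

def count_keyword_hits_alt (content : String) (keywords : List (String × Int)) : List String × Int :=
  let lowered := PySem.Chars.lower content.toList
  let pending := PySem.List.dedup (keywords.map (fun p => PySem.Chars.lower p.1.toList))
  let st := (PySem.List.pyRange 0 ((lowered.length : Int) + 1) 1).foldl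
      (pvScanStep lowered) (pending, PySem.Set.empty)
  let found := st.2
  ((keywords.filter (fun p => PySem.Set.contains found (PySem.Chars.lower p.1.toList))).map (fun p => p.1),
   ((keywords.filter (fun p => PySem.Set.contains found (PySem.Chars.lower p.1.toList))).map (fun p => p.2)).sum)

-- ===== PRECONDITION & SPEC =====
def Spec_count_keyword_hits (content : String) (keywords : List (String × Int)) (out : List String × Int) : Prop := out = count_keyword_hits_alt content keywords
instance (content : String) (keywords : List (String × Int)) (out : List String × Int) : Decidable (Spec_count_keyword_hits content keywords out) := by unfold Spec_count_keyword_hits; infer_instance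

-- ===== CLAIM =====
def Claim_equal_count_keyword_hits : Prop := ∀ (content : String) (keywords : List (String × Int)), Dom_count_keyword_hits content keywords → Spec_count_keyword_hits content keywords (count_keyword_hits content keywords)

-- ===== LEMMAS AND PROOFS =====

-- membership in the found-set after B's scan over any index list
theorem pv_mem_scan (lowered : List Char) (is : List Int)
    (pend : List (List Char)) (fnd : PySem.Set (List Char)) (kw : List Char) :
    kw ∈ (is.foldl (pvScanStep lowered) (pend, fnd)).2
    ↔ kw ∈ fnd ∨ (kw ∈ pend ∧ ∃ i ∈ is,
        PySem.Chars.startswith (lowered.drop i.toNat) kw = true) := by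
  induction is generalizing pend fnd with
  | nil => simp
  | cons i rest ih =>
      rw [List.foldl_cons]
      by_cases hp : pend.isEmpty
      · rw [show pvScanStep lowered (pend, fnd) i = (pend, fnd) by
          simp [pvScanStep, hp]]
        rw [ih]
        rw [List.isEmpty_iff] at hp
        subst hp; simp
      · rw [show pvScanStep lowered (pend, fnd) i =
          (pend.filter (fun kw => !PySem.Set.contains
              (PySem.Set.update fnd (pend.filter (fun kw => PySem.Chars.startswith (lowered.drop i.toNat) kw))) kw),
           PySem.Set.update fnd (pend.filter (fun kw => PySem.Chars.startswith (lowered.drop i.toNat) kw))) by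
          simp [pvScanStep, hp]]
        rw [ih]
        simp only [PySem.Set.mem_update, List.mem_filter, List.mem_cons,
          Bool.not_eq_eq_eq_not, Bool.not_true, PySem.Set.contains_eq_listContains,
          List.contains_eq_mem, decide_eq_false_iff_not, PySem.Set.mem_update]
        constructor
        · rintro ((hf | ⟨hpend, hsw⟩) | ⟨⟨hpend, _⟩, j, hj, hsw⟩)
          · exact Or.inl hf
          · exact Or.inr ⟨hpend, i, Or.inl rfl, hsw⟩
          · exact Or.inr ⟨hpend, j, Or.inr hj, hsw⟩
        · rintro (hf | ⟨hpend, j, hj | hj, hsw⟩)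
          · exact Or.inl (Or.inl hf)
          · subst hj; exact Or.inl (Or.inr ⟨hpend, hsw⟩)
          · by_cases hnow : kw ∈ fnd ∨ kw ∈ pend ∧ PySem.Chars.startswith (lowered.drop i.toNat) kw = true
            · exact Or.inl hnow
            · exact Or.inr ⟨⟨hpend, hnow⟩, j, hj, hsw⟩

-- the scanned positions 0..len cover substring occurrence
theorem pv_exists_pos_iff (lowered kw : List Char) :
    (∃ i ∈ PySem.List.pyRange 0 ((lowered.length : Int) + 1) 1,
        PySem.Chars.startswith (lowered.drop i.toNat) kw = true)
    ↔ PySem.Chars.isIn kw lowered = true := by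
  rw [← PySem.Chars.exists_prefix_drop_iff_isIn]
  constructor
  · rintro ⟨i, _, hsw⟩
    exact ⟨i.toNat, (PySem.Chars.startswith_iff _ _).mp hsw⟩
  · rintro ⟨j, hpre⟩
    by_cases hj : j ≤ lowered.length
    · refine ⟨(j : Int), ?_, (PySem.Chars.startswith_iff _ _).mpr (by simpa using hpre)⟩
      rw [PySem.List.mem_pyRange_one]
      omega
    · have : lowered.drop j = [] := List.drop_eq_nil_of_le (by omega)
      rw [this, List.prefix_nil] at hpre
      refine ⟨0, ?_, (PySem.Chars.startswith_iff _ _).mpr (by simp [hpre])⟩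
      rw [PySem.List.mem_pyRange_one]
      omega

-- A's accumulator loop computes the filtered hits and the sum of their weights
theorem pv_foldA (ks : List (String × Int)) (c : String × Int → Bool)
    (h : List String) (s : Int) :
    ks.foldl (fun acc p => if c p then (acc.1 ++ [p.1], acc.2 + p.2) else acc) (h, s)
    = (h ++ (ks.filter c).map (fun p => p.1), s + ((ks.filter c).map (fun p => p.2)).sum) := by
  induction ks generalizing h s with
  | nil => simp
  | cons p rest ih =>
      by_cases hc : c p = true
      · simp [hc, ih, add_assoc]
      · simp [hc, ih]

-- ===== VERDICT =====
theorem count_keyword_hits_spec : Claim_equal_count_keyword_hits := by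
  intro content keywords _
  unfold Spec_count_keyword_hits count_keyword_hits count_keyword_hits_alt
  rw [pv_foldA]
  have hfilter :
      keywords.filter (fun p => PySem.Str.isIn (PySem.Str.lower p.1) (PySem.Str.lower content))
      = keywords.filter (fun p =>
          PySem.Set.contains
            ((PySem.List.pyRange 0 (((PySem.Chars.lower content.toList).length : Int) + 1) 1).foldl
              (pvScanStep (PySem.Chars.lower content.toList))
              (PySem.List.dedup (keywords.map (fun p => PySem.Chars.lower p.1.toList)), PySem.Set.empty)).2
            (PySem.Chars.lower p.1.toList)) := by
    apply List.filter_congr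
    intro p hp
    have hmem : PySem.Chars.lower p.1.toList
        ∈ PySem.List.dedup (keywords.map (fun p => PySem.Chars.lower p.1.toList)) := by
      rw [PySem.List.mem_dedup]
      exact List.mem_map.mpr ⟨p, hp, rfl⟩
    rw [Bool.eq_iff_iff, PySem.Set.contains_iff, pv_mem_scan]
    rw [show PySem.Str.isIn (PySem.Str.lower p.1) (PySem.Str.lower content)
        = PySem.Chars.isIn (PySem.Chars.lower p.1.toList) (PySem.Chars.lower content.toList) by
      simp [pysem]]
    rw [← pv_exists_pos_iff]
    simp only [PySem.Set.empty, List.not_mem_nil, false_or]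
    exact (and_iff_right hmem).symm
  simp only [hfilter, List.nil_append, zero_add]
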